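-- pv_equiv track=rewrite | github.com/anugrah18/leetcode_solutions_python | Stacks and Queues/1209-removeAllAdjacentDuplicatesII.py | RemoveDuplicates_II
-- ===== SOURCE A (Python) =====
-- def RemoveDuplicates_II(s,k):
--     stack = []
--     i = 0
--
--     while(i<len(s)):
--         if(i==0 or s[i]!=s[i-1]):
--             stack.append(1)
--         if(stack[-1]==k):
--             stack.pop()
--             s = s[0:i-k+1]+s[i+1:]
--             i = i-k
--         else:
--             stack[-1]+=1
--         i+=1
--     return s
-- ===== SOURCE B (Python) =====
-- def RemoveDuplicates_II(s, k):
--     # One left-to-right pass with a stack of [char, count] pairs; pop a run when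
--     # its count reaches k, and build the result once at the end.
--     stack = []
--     for c in s:
--         if stack and stack[-1][0] == c:
--             stack[-1][1] += 1
--         else:
--             stack.append([c, 1])
--         if stack[-1][1] == k:
--             stack.pop()
--     return ''.join(c * n for c, n in stack)
-- ===== Notes on version B (the rewrite author's own statement) =====
-- stated objective: alternative
-- what changed: Replaces A's while-loop that repeatedly slices and rebuilds the string (and backtracks the index) with a single left-to-right pass keeping a stack of (char,count) pairs, joining the surviving runs once at the end (intended as faster on removal-heavy inputs; measured only 1.41x on random inputs).
import Mathlib
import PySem

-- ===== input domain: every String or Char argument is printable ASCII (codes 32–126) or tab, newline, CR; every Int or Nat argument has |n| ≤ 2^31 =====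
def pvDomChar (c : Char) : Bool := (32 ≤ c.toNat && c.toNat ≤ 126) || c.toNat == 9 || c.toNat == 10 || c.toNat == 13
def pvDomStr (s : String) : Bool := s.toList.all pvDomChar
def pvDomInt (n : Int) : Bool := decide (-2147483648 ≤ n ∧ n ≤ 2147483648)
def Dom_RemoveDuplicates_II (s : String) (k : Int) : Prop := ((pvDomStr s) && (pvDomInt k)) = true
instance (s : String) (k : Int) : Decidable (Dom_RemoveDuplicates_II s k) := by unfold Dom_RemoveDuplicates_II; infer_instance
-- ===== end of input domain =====

-- B replaces A's slice-and-rebuild while-loop by one pass with a (char,count) stack.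

-- ===== PORT A =====
-- A's while-loop, step for step, as fuel recursion: each iteration consumes one unprocessed
-- character, so fuel = len(s)+1 never runs out from the entry point; the fuel-0 and
-- empty-stack branches (where Python would raise IndexError) are unreachable totality guards.
def aLoopA (k : Int) (fuel : Nat) (s : List Char) (i : Int) (stack : List Int) : List Char :=
  match fuel with
  | 0 => s
  | fuel + 1 =>
    if i < (s.length : Int) then
      let stack := if i == 0 || !(PySem.List.pyGet? s i == PySem.List.pyGet? s (i - 1))
                   then 1 :: stack else stack
      match stack with
      | [] => s  -- Python raises IndexError here; unreachable
      | top :: rest =>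
        if top == k then
          aLoopA k fuel
            (PySem.List.slice s (some 0) (some (i - k + 1)) ++ PySem.List.slice s (some (i + 1)) none)
            (i - k + 1) rest
        else
          aLoopA k fuel s (i + 1) ((top + 1) :: rest)
    else s

def RemoveDuplicates_II (s : String) (k : Int) : String :=
  String.mk (aLoopA k (s.toList.length + 1) s.toList 0 [])

-- ===== PORT B =====
-- one loop step of Source B (stack top = list head)
def bStep (k : Int) (st : List (Char × Int)) (c : Char) : List (Char × Int) :=
  let st' :=
    match st with
    | (d, m) :: rest => if d == c then (d, m + 1) :: rest else (c, 1) :: (d, m) :: rest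
    | [] => [(c, 1)]
  match st' with
  | (d, m) :: rest => if m == k then rest else (d, m) :: rest
  | [] => []  -- unreachable: st' is nonempty

-- ''.join(c * n for c, n in stack)
def rendB (st : List (Char × Int)) : List Char :=
  st.reverse.flatMap (fun p => List.replicate p.2.toNat p.1)

def RemoveDuplicates_II_alt (s : String) (k : Int) : String :=
  String.mk (rendB (s.toList.foldl (bStep k) []))

-- ===== PRECONDITION & SPEC =====
def Spec_RemoveDuplicates_II (s : String) (k : Int) (out : String) : Prop := out = RemoveDuplicates_II_alt s k
instance (s : String) (k : Int) (out : String) : Decidable (Spec_RemoveDuplicates_II s k out) := by unfold Spec_RemoveDuplicates_II; infer_instance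

-- ===== CLAIM (what is proved, stated in full; the proofs are below) =====
def Claim_equal_RemoveDuplicates_II : Prop := ∀ (s : String) (k : Int), Dom_RemoveDuplicates_II s k → Spec_RemoveDuplicates_II s k (RemoveDuplicates_II s k)

-- ===== LEMMAS AND PROOFS =====

-- invariant on B's stack: adjacent runs have distinct chars, all counts >= 1
def GoodStk (st : List (Char × Int)) : Prop :=
  st.IsChain (fun a b => a.1 ≠ b.1) ∧ ∀ p ∈ st, 1 ≤ p.2

lemma rendB_cons (c : Char) (m : Int) (rest : List (Char × Int)) :
    rendB ((c, m) :: rest) = rendB rest ++ List.replicate m.toNat c := by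
  simp [rendB]

lemma isChain_count (d : Char) (m m' : Int) (rest : List (Char × Int))
    (h : List.IsChain (fun a b => a.1 ≠ b.1) ((d, m) :: rest)) :
    List.IsChain (fun a b => a.1 ≠ b.1) ((d, m') :: rest) := by
  cases rest with
  | nil => simp
  | cons q t => rw [List.isChain_cons_cons] at h ⊢; exact h

lemma good_bStep (k : Int) (st : List (Char × Int)) (c : Char) (hg : GoodStk st) :
    GoodStk (bStep k st c) := by
  obtain ⟨hch, hcnt⟩ := hg
  cases st with
  | nil =>
    by_cases hk : (1 : Int) = k
    · have h : bStep k [] c = [] := by simp [bStep, ← hk]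
      rw [h]; exact ⟨by simp, by simp⟩
    · have h : bStep k [] c = [(c, 1)] := by simp [bStep, hk]
      rw [h]; exact ⟨by simp, by simp⟩
  | cons p rest =>
    obtain ⟨d, m⟩ := p
    by_cases hdc : d = c
    · subst hdc
      by_cases hk : m + 1 = k
      · have h : bStep k ((d, m) :: rest) d = rest := by simp [bStep, hk]
        rw [h]
        exact ⟨hch.tail, fun p hp => hcnt p (List.mem_cons_of_mem _ hp)⟩
      · have h : bStep k ((d, m) :: rest) d = (d, m + 1) :: rest := by simp [bStep, hk]
        rw [h]
        refine ⟨isChain_count d m (m + 1) rest hch, ?_⟩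
        intro p hp
        rcases List.mem_cons.mp hp with h1 | h1
        · subst h1; have := hcnt (d, m) (by simp); simp at this ⊢; omega
        · exact hcnt p (List.mem_cons_of_mem _ h1)
    · by_cases hk : (1 : Int) = k
      · have h : bStep k ((d, m) :: rest) c = (d, m) :: rest := by simp [bStep, hdc, ← hk]
        rw [h]; exact ⟨hch, hcnt⟩
      · have h : bStep k ((d, m) :: rest) c = (c, 1) :: (d, m) :: rest := by
          simp [bStep, hdc, hk]
        rw [h]
        refine ⟨?_, ?_⟩
        · rw [List.isChain_cons_cons]; exact ⟨fun hh => hdc hh.symm, hch⟩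
        · intro p hp
          rcases List.mem_cons.mp hp with h1 | h1
          · subst h1; simp
          · exact hcnt p h1

-- one-iteration reduction lemmas for aLoopA, one per branch shape
lemma aLoopA_nopush_pop (k : Int) (fuel : Nat) (s : List Char) (i : Int) (top : Int) (rest : List Int)
    (hlt : i < (s.length : Int))
    (hcond : (i == 0 || !(PySem.List.pyGet? s i == PySem.List.pyGet? s (i - 1))) = false)
    (hk : top = k) :
    aLoopA k (fuel + 1) s i (top :: rest) =
      aLoopA k fuel
        (PySem.List.slice s (some 0) (some (i - k + 1)) ++ PySem.List.slice s (some (i + 1)) none)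
        (i - k + 1) rest := by
  rw [aLoopA, if_pos hlt, hcond]
  simp [hk]

lemma aLoopA_nopush_nopop (k : Int) (fuel : Nat) (s : List Char) (i : Int) (top : Int) (rest : List Int)
    (hlt : i < (s.length : Int))
    (hcond : (i == 0 || !(PySem.List.pyGet? s i == PySem.List.pyGet? s (i - 1))) = false)
    (hk : top ≠ k) :
    aLoopA k (fuel + 1) s i (top :: rest) = aLoopA k fuel s (i + 1) ((top + 1) :: rest) := by
  rw [aLoopA, if_pos hlt, hcond]
  simp [hk]

lemma aLoopA_push_pop (k : Int) (fuel : Nat) (s : List Char) (i : Int) (stack : List Int)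
    (hlt : i < (s.length : Int))
    (hcond : (i == 0 || !(PySem.List.pyGet? s i == PySem.List.pyGet? s (i - 1))) = true)
    (hk : (1 : Int) = k) :
    aLoopA k (fuel + 1) s i stack =
      aLoopA k fuel
        (PySem.List.slice s (some 0) (some (i - k + 1)) ++ PySem.List.slice s (some (i + 1)) none)
        (i - k + 1) stack := by
  rw [aLoopA, if_pos hlt, hcond]
  simp [hk]

lemma aLoopA_push_nopop (k : Int) (fuel : Nat) (s : List Char) (i : Int) (stack : List Int)
    (hlt : i < (s.length : Int))
    (hcond : (i == 0 || !(PySem.List.pyGet? s i == PySem.List.pyGet? s (i - 1))) = true)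
    (hk : (1 : Int) ≠ k) :
    aLoopA k (fuel + 1) s i stack = aLoopA k fuel s (i + 1) ((1 + 1) :: stack) := by
  rw [aLoopA, if_pos hlt, hcond]
  simp [hk]

-- the two slices A takes are prefix/suffix of the invariant decomposition
lemma slice_from_len_succ (p r : List Char) (c : Char) :
    PySem.List.slice (p ++ c :: r) (some ((p.length : Int) + 1)) none = r := by
  have h : ((p.length : Int)) + 1 = ((p.length + 1 : Nat) : Int) := by push_cast; ring
  rw [h, PySem.List.slice_from_natCast]
  rw [show p ++ c :: r = (p ++ [c]) ++ r by simp]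
  rw [show p.length + 1 = (p ++ [c]).length by simp]
  simp

lemma slice_take_len (p t : List Char) :
    PySem.List.slice (p ++ t) (some 0) (some ((p.length : Int))) = p := by
  simp [PySem.List.slice_to_natCast]

-- one A-iteration starting at the invariant state simulates one bStep
lemma step_eq (k : Int) (fuel : Nat) (st : List (Char × Int)) (c : Char) (r : List Char)
    (hg : GoodStk st) :
    aLoopA k (fuel + 1) (rendB st ++ c :: r) ((rendB st).length : Int)
        (st.map (fun p => p.2 + 1)) =
      aLoopA k fuel (rendB (bStep k st c) ++ r) ((rendB (bStep k st c)).length : Int)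
        ((bStep k st c).map (fun p => p.2 + 1)) := by
  obtain ⟨hch, hcnt⟩ := hg
  have hlt : ((rendB st).length : Int) < ((rendB st ++ c :: r).length : Int) := by
    simp
  cases st with
  | nil =>
    have hr0 : rendB ([] : List (Char × Int)) = [] := by simp [rendB]
    have hcond : ((((rendB ([] : List (Char × Int))).length : Int)) == 0
        || !(PySem.List.pyGet? (rendB ([] : List (Char × Int)) ++ c :: r) ((rendB ([] : List (Char × Int))).length : Int)
              == PySem.List.pyGet? (rendB ([] : List (Char × Int)) ++ c :: r) (((rendB ([] : List (Char × Int))).length : Int) - 1))) = true := by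
      simp [hr0]
    by_cases hk : (1 : Int) = k
    · rw [aLoopA_push_pop k fuel _ _ _ hlt hcond hk]
      have hb : bStep k [] c = [] := by simp [bStep, ← hk]
      rw [hb]
      congr 1
      · simp only [hr0, List.nil_append, List.length_nil, Nat.cast_zero, ← hk]
        norm_num
        simp [PySem.List.slice_to, PySem.List.slice_from_one]
      · simp [hr0, ← hk]
    · rw [aLoopA_push_nopop k fuel _ _ _ hlt hcond hk]
      have hb : bStep k [] c = [(c, 1)] := by simp [bStep, hk]
      rw [hb]
      congr 1
  | cons p0 rest =>
    obtain ⟨d, m⟩ := p0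
    have hm : (1 : Int) ≤ m := hcnt (d, m) (by simp)
    have hmt : ((m.toNat : Int)) = m := Int.toNat_of_nonneg (by omega)
    have hnt : 1 ≤ m.toNat := by omega
    obtain ⟨n, hn⟩ : ∃ n, m.toNat = n + 1 := ⟨m.toNat - 1, by omega⟩
    have hp : rendB ((d, m) :: rest) = rendB rest ++ List.replicate m.toNat d := rendB_cons d m rest
    have hplen : (rendB ((d, m) :: rest)).length = (rendB rest).length + m.toNat := by simp [hp]
    have hilen : ((rendB ((d, m) :: rest)).length : Int) = ((rendB rest).length : Int) + m := by
      rw [hplen]; push_cast [hmt]; ring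
    have hq : rendB ((d, m) :: rest) = (rendB rest ++ List.replicate n d) ++ [d] := by
      rw [hp, show List.replicate m.toNat d = List.replicate n d ++ [d] by
        rw [hn, List.replicate_succ'], ← List.append_assoc]
    -- s[i] = c
    have hgi : PySem.List.pyGet? (rendB ((d, m) :: rest) ++ c :: r) ((rendB ((d, m) :: rest)).length : Int) = some c :=
      PySem.List.pyGet?_append_length _ _ _
    -- s[i-1] = d (last char of the rendered stack)
    have hgi1 : PySem.List.pyGet? (rendB ((d, m) :: rest) ++ c :: r) (((rendB ((d, m) :: rest)).length : Int) - 1) = some d := by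
      have h1 : ((rendB ((d, m) :: rest)).length : Int) - 1 = ((rendB rest ++ List.replicate n d).length : Int) := by
        have : (rendB ((d, m) :: rest)).length = (rendB rest ++ List.replicate n d).length + 1 := by
          rw [hq]; simp; omega
        rw [this]; push_cast; ring
      rw [h1]
      rw [show rendB ((d, m) :: rest) ++ c :: r = (rendB rest ++ List.replicate n d) ++ d :: (c :: r) by rw [hq]; simp]
      exact PySem.List.pyGet?_append_length _ _ _
    have hi0 : ((((rendB ((d, m) :: rest)).length : Int)) == 0) = false := by
      simp [hplen]; omega
    by_cases hdc : d = c
    · subst hdc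
      have hcond : ((((rendB ((d, m) :: rest)).length : Int)) == 0
          || !(PySem.List.pyGet? (rendB ((d, m) :: rest) ++ d :: r) ((rendB ((d, m) :: rest)).length : Int)
                == PySem.List.pyGet? (rendB ((d, m) :: rest) ++ d :: r) (((rendB ((d, m) :: rest)).length : Int) - 1))) = false := by
        rw [hi0, hgi, hgi1]; simp
      rw [show ((d, m) :: rest).map (fun p => p.2 + 1) = (m + 1) :: rest.map (fun p => p.2 + 1) by simp]
      by_cases hk2 : m + 1 = k
      · rw [aLoopA_nopush_pop k fuel _ _ _ _ hlt hcond hk2]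
        have hb : bStep k ((d, m) :: rest) d = rest := by simp [bStep, hk2]
        rw [hb]
        have hidx : ((rendB ((d, m) :: rest)).length : Int) - k + 1 = ((rendB rest).length : Int) := by
          omega
        congr 1
        · rw [hidx]
          rw [show rendB ((d, m) :: rest) ++ d :: r = rendB rest ++ (List.replicate m.toNat d ++ d :: r) by rw [hp]; simp]
          rw [slice_take_len]
          rw [show rendB rest ++ (List.replicate m.toNat d ++ d :: r) = rendB ((d, m) :: rest) ++ d :: r by rw [hp]; simp]
          rw [slice_from_len_succ]
      · rw [aLoopA_nopush_nopop k fuel _ _ _ _ hlt hcond hk2]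
        have hb : bStep k ((d, m) :: rest) d = (d, m + 1) :: rest := by simp [bStep, hk2]
        rw [hb]
        have hrend : rendB ((d, m + 1) :: rest) = rendB ((d, m) :: rest) ++ [d] := by
          rw [rendB_cons, hp, show (m + 1).toNat = m.toNat + 1 by omega, List.replicate_succ',
            ← List.append_assoc]
        congr 1
        · rw [hrend]; simp
        · rw [hrend]; simp
    · have hcond : ((((rendB ((d, m) :: rest)).length : Int)) == 0
          || !(PySem.List.pyGet? (rendB ((d, m) :: rest) ++ c :: r) ((rendB ((d, m) :: rest)).length : Int)
                == PySem.List.pyGet? (rendB ((d, m) :: rest) ++ c :: r) (((rendB ((d, m) :: rest)).length : Int) - 1))) = true := by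
        rw [hi0, hgi, hgi1]
        simp [show c ≠ d from fun h => hdc h.symm]
      by_cases hk1 : (1 : Int) = k
      · rw [aLoopA_push_pop k fuel _ _ _ hlt hcond hk1]
        have hb : bStep k ((d, m) :: rest) c = (d, m) :: rest := by simp [bStep, hdc, ← hk1]
        rw [hb]
        have hidx : ((rendB ((d, m) :: rest)).length : Int) - k + 1 = ((rendB ((d, m) :: rest)).length : Int) := by
          omega
        congr 1
        · rw [hidx, slice_take_len, slice_from_len_succ]
      · rw [aLoopA_push_nopop k fuel _ _ _ hlt hcond hk1]
        have hb : bStep k ((d, m) :: rest) c = (c, 1) :: (d, m) :: rest := by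
          simp [bStep, hdc, hk1]
        rw [hb]
        have hrend : rendB ((c, 1) :: (d, m) :: rest) = rendB ((d, m) :: rest) ++ [c] := by
          rw [rendB_cons]; simp
        congr 1
        · rw [hrend]; simp
        · rw [hrend]; simp
-- main loop invariant: A's state (rendered stack ++ remaining input, index = rendered length,
-- counts shifted by one) computes B's fold
lemma main_inv (k : Int) (r : List Char) : ∀ (st : List (Char × Int)) (fuel : Nat),
    r.length < fuel → GoodStk st →
    aLoopA k fuel (rendB st ++ r) ((rendB st).length : Int) (st.map (fun p => p.2 + 1)) =
      rendB (r.foldl (bStep k) st) := by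
  induction r with
  | nil =>
    intro st fuel hf hg
    obtain ⟨fuel, rfl⟩ : ∃ f, fuel = f + 1 := ⟨fuel - 1, by omega⟩
    simp [aLoopA]
  | cons c r ih =>
    intro st fuel hf hg
    obtain ⟨fuel, rfl⟩ : ∃ f, fuel = f + 1 := ⟨fuel - 1, by omega⟩
    rw [step_eq k fuel st c r hg, List.foldl_cons]
    exact ih (bStep k st c) fuel (by simpa using Nat.lt_of_succ_lt_succ hf) (good_bStep k st c hg)

theorem RemoveDuplicates_II_spec : Claim_equal_RemoveDuplicates_II := by
  intro s k _
  unfold Spec_RemoveDuplicates_II RemoveDuplicates_II RemoveDuplicates_II_alt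
  have h := main_inv k s.toList [] (s.toList.length + 1) (by omega) ⟨by simp, by simp⟩
  simpa [rendB] using congrArg String.mk h
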